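-- pv_equiv track=rewrite | github.com/nghiatt90/cs-practice | codelearn/moretimesless.py | moreTimesLess
-- ===== SOURCE A (Python) =====
-- def moreTimesLess(n):
--     if n == 1:
--         return 0
--     upperbound = int(n ** .5) + 1
--     results = 0
--     for a in range(1, upperbound):
--         if n % a == 0 and a % 2 == (n // a) % 2:
--             results += 1
--     return results
-- ===== SOURCE B (Python) =====
-- def moreTimesLess(n):
--     if n == 1:
--         return 0
--     if n % 4 == 2:
--         return 0
--     s = int(n ** .5)
--     if n % 2:
--         # odd n: every divisor pair is odd-odd, so count all divisors up to sqrt(n)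
--         return sum(1 for a in range(1, s + 1) if n % a == 0)
--     # n % 4 == 0: pairs (2a, n//(2a)) with both halves even <=> a divides n//4, a <= s//2
--     m = n // 4
--     return sum(1 for a in range(1, s // 2 + 1) if m % a == 0)
-- ===== Notes on version B (the rewrite author's own statement) =====
-- stated objective: alternative
-- what changed: B replaces A's single uniform scan with a parity-filtered test by a case split on n mod 4: n%4==2 returns 0 with no loop, odd n counts plain divisors up to sqrt(n), and n%4==0 counts divisors of n//4 up to sqrt(n)//2 (a range half as long, with no parity test in the loop).
import Mathlib
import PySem

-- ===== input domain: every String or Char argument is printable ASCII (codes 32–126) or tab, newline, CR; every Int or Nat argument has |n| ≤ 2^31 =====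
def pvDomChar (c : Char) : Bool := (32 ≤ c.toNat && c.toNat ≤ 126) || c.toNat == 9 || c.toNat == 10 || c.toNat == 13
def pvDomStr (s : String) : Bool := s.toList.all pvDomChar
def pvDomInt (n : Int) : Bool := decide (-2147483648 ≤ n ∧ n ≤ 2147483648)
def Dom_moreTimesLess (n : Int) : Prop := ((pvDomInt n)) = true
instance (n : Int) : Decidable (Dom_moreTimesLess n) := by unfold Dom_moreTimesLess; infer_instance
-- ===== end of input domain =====

-- B replaces A's uniform parity-filtered divisor scan by a case split on n mod 4: loop-free for
-- n % 4 == 2, a plain divisor count for odd n, and a divisor count of n//4 over a half-length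
-- range for n % 4 == 0 (objective: alternative decomposition; no speed claim).

-- ===== PORT A =====
-- int(n ** .5) is exact for 0 ≤ n ≤ 2^31 and is ported as Nat.sqrt n.toNat (Pre_ gives 0 ≤ n)
def moreTimesLess (n : Int) : Int :=
  if n = 1 then 0
  else
    let upperbound : Int := (Nat.sqrt n.toNat : Int) + 1
    (PySem.List.pyRange 1 upperbound 1).foldl
      (fun results a =>
        if PySem.Int.mod n a = 0 ∧ PySem.Int.mod a 2 = PySem.Int.mod (PySem.Int.floordiv n a) 2
        then results + 1 else results) 0

-- ===== PORT B =====
-- sum(1 for a in range(...) if cond) is ported as the sum of the mapped 0/1 values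
def moreTimesLess_alt (n : Int) : Int :=
  if n = 1 then 0
  else if PySem.Int.mod n 4 = 2 then 0
  else
    let s : Int := (Nat.sqrt n.toNat : Int)
    if PySem.Int.mod n 2 ≠ 0 then
      ((PySem.List.pyRange 1 (s + 1) 1).map
        (fun a => if PySem.Int.mod n a = 0 then (1 : Int) else 0)).sum
    else
      let m : Int := PySem.Int.floordiv n 4
      ((PySem.List.pyRange 1 (PySem.Int.floordiv s 2 + 1) 1).map
        (fun a => if PySem.Int.mod m a = 0 then (1 : Int) else 0)).sum

-- ===== PRECONDITION & SPEC =====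
-- Pre_: for n < 0 the Python A evaluates n ** .5 to a complex number and raises TypeError
def Pre_moreTimesLess (n : Int) : Prop := 0 ≤ n
instance (n : Int) : Decidable (Pre_moreTimesLess n) := by unfold Pre_moreTimesLess; infer_instance
def pvWitness_moreTimesLess : Int := 12

def Spec_moreTimesLess (n : Int) (out : Int) : Prop := out = moreTimesLess_alt n
instance (n : Int) (out : Int) : Decidable (Spec_moreTimesLess n out) := by unfold Spec_moreTimesLess; infer_instance

-- ===== CLAIM (what is proved, stated in full; the proofs are below) =====
def Claim_equal_moreTimesLess : Prop := ∀ (n : Int), Dom_moreTimesLess n → Pre_moreTimesLess n → Spec_moreTimesLess n (moreTimesLess n)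

-- ===== LEMMAS AND PROOFS =====

lemma sum_map_ite_one_zero' {α : Type} (p : α → Prop) [DecidablePred p] (xs : List α) :
    (xs.map (fun x => if p x then (1 : Int) else 0)).sum = (xs.countP (fun x => decide (p x)) : Int) := by
  have := PySem.List.sum_map_ite_one_zero (fun x => decide (p x)) xs
  simpa using this

lemma pred_false_of_odd_a (m a : Int) (ha : 0 < a) (hodd : a % 2 = 1) :
    ¬(PySem.Int.mod (4 * m) a = 0 ∧
      PySem.Int.mod a 2 = PySem.Int.mod (PySem.Int.floordiv (4 * m) a) 2) := by
  rintro ⟨hd, hp⟩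
  rw [PySem.Int.mod_eq_zero_iff_dvd] at hd
  obtain ⟨q, hq⟩ := hd
  rw [PySem.Int.floordiv_eq_ediv_of_pos ha, hq, Int.mul_ediv_cancel_left q (by omega),
      PySem.Int.mod_eq_emod_of_pos (by norm_num : (0:Int) < 2),
      PySem.Int.mod_eq_emod_of_pos (by norm_num : (0:Int) < 2)] at hp
  have hq2 : q % 2 = 1 := by omega
  have h1 : (4 * m) % 2 = 1 := by rw [hq, Int.mul_emod, hodd, hq2]; decide
  omega

lemma even_pair_iff (m j : Int) (hj : 0 < j) :
    (PySem.Int.mod (4 * m) (2 * j) = 0 ∧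
      PySem.Int.mod (2 * j) 2 = PySem.Int.mod (PySem.Int.floordiv (4 * m) (2 * j)) 2)
      ↔ PySem.Int.mod m j = 0 := by
  have h2j : (0:Int) < 2 * j := by omega
  rw [PySem.Int.mod_eq_zero_iff_dvd, PySem.Int.mod_eq_zero_iff_dvd,
      PySem.Int.floordiv_eq_ediv_of_pos h2j,
      PySem.Int.mod_eq_emod_of_pos (by norm_num : (0:Int) < 2),
      PySem.Int.mod_eq_emod_of_pos (by norm_num : (0:Int) < 2)]
  constructor
  · rintro ⟨⟨q, hq⟩, hp⟩
    have hdiv : 4 * m / (2 * j) = q := by rw [hq, Int.mul_ediv_cancel_left q (by omega)]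
    rw [hdiv] at hp
    have hq2 : q % 2 = 0 := by omega
    obtain ⟨t, rfl⟩ := Int.dvd_of_emod_eq_zero hq2
    refine ⟨t, ?_⟩
    have h4 : 4 * m = 4 * (j * t) := by rw [hq]; ring
    omega
  · rintro ⟨t, rfl⟩
    have hq : 4 * (j * t) = 2 * j * (2 * t) := by ring
    refine ⟨⟨2 * t, hq⟩, ?_⟩
    rw [hq, Int.mul_ediv_cancel_left _ (by omega)]
    omega

lemma count4 (m : Int) (k : Nat) :
    (PySem.List.pyRange 1 ((k : Int) + 1) 1).countP
        (fun a => decide (PySem.Int.mod (4 * m) a = 0 ∧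
          PySem.Int.mod a 2 = PySem.Int.mod (PySem.Int.floordiv (4 * m) a) 2))
      = (PySem.List.pyRange 1 (((k / 2 : Nat) : Int) + 1) 1).countP
          (fun a => decide (PySem.Int.mod m a = 0)) := by
  induction k with
  | zero => simp [PySem.List.pyRange_one_eq_nil]
  | succ k ih =>
    have h1 : ((k + 1 : Nat) : Int) + 1 = ((k : Nat) : Int) + 1 + 1 := by push_cast; ring
    rw [h1, PySem.List.pyRange_one_succ_right (by omega), List.countP_append]
    rcases Nat.even_or_odd (k + 1) with ⟨j, hj⟩ | hodd
    · -- k+1 = 2j even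
      have hj1 : 1 ≤ j := by omega
      have e2 : (((k + 1) / 2 : Nat) : Int) + 1 = (((k / 2 : Nat) : Int) + 1) + 1 := by omega
      rw [e2]
      conv_rhs => rw [PySem.List.pyRange_one_succ_right (by omega : (1:Int) ≤ ((k / 2 : Nat) : Int) + 1)]
      rw [List.countP_append, ih]
      congr 1
      have ha : ((k : Nat) : Int) + 1 = 2 * (((k / 2 : Nat) : Int) + 1) := by omega
      have hiff := even_pair_iff m (((k / 2 : Nat) : Int) + 1) (by omega)
      simp only [List.countP_cons, List.countP_nil, Nat.zero_add, ha]
      rw [decide_eq_decide.mpr hiff]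
    · -- k+1 odd
      obtain ⟨j, hj⟩ := hodd
      have e1 : (((k + 1) / 2 : Nat) : Int) = (((k / 2) : Nat) : Int) := by omega
      rw [e1]
      have hfalse := pred_false_of_odd_a m (((k : Nat) : Int) + 1) (by omega) (by omega)
      have hd : (decide (PySem.Int.mod (4 * m) (((k : Nat) : Int) + 1) = 0 ∧
          PySem.Int.mod (((k : Nat) : Int) + 1) 2 =
            PySem.Int.mod (PySem.Int.floordiv (4 * m) (((k : Nat) : Int) + 1)) 2)) = false :=
        decide_eq_false hfalse
      simp only [List.countP_cons, List.countP_nil, hd, Bool.false_eq_true, if_false,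
        Nat.add_zero]
      exact ih

lemma odd_case_pred (n a : Int) (hn : PySem.Int.mod n 2 ≠ 0) (ha : 0 < a) :
    (PySem.Int.mod n a = 0 ∧ PySem.Int.mod a 2 = PySem.Int.mod (PySem.Int.floordiv n a) 2)
      ↔ PySem.Int.mod n a = 0 := by
  rw [PySem.Int.mod_eq_emod_of_pos (by norm_num : (0:Int) < 2)] at hn
  constructor
  · exact fun h => h.1
  · intro hd
    refine ⟨hd, ?_⟩
    rw [PySem.Int.mod_eq_zero_iff_dvd] at hd
    obtain ⟨q, hq⟩ := hd
    rw [PySem.Int.floordiv_eq_ediv_of_pos ha, hq,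
        Int.mul_ediv_cancel_left q (by omega),
        PySem.Int.mod_eq_emod_of_pos (by norm_num : (0:Int) < 2),
        PySem.Int.mod_eq_emod_of_pos (by norm_num : (0:Int) < 2)]
    rcases Int.emod_two_eq a with he | ho
    · exfalso
      obtain ⟨a', rfl⟩ := Int.dvd_of_emod_eq_zero he
      have h0 : n % 2 = 0 := by
        have h1 : n = 2 * (a' * q) := by rw [hq]; ring
        rw [h1]; exact Int.mul_emod_right 2 _
      omega
    · rcases Int.emod_two_eq q with he' | ho'
      · exfalso
        obtain ⟨q', rfl⟩ := Int.dvd_of_emod_eq_zero he'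
        have h0 : n % 2 = 0 := by
          have h1 : n = 2 * (a * q') := by rw [hq]; ring
          rw [h1]; exact Int.mul_emod_right 2 _
        omega
      · omega

lemma pred_false_of_mod4 (n a : Int) (h2 : PySem.Int.mod n 4 = 2) (ha : 0 < a) :
    ¬(PySem.Int.mod n a = 0 ∧ PySem.Int.mod a 2 = PySem.Int.mod (PySem.Int.floordiv n a) 2) := by
  rintro ⟨hd, hp⟩
  rw [PySem.Int.mod_eq_emod_of_pos (by norm_num)] at h2
  rw [PySem.Int.mod_eq_zero_iff_dvd] at hd
  obtain ⟨q, hq⟩ := hd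
  rw [PySem.Int.floordiv_eq_ediv_of_pos ha, hq,
      Int.mul_ediv_cancel_left q (by omega),
      PySem.Int.mod_eq_emod_of_pos (by norm_num : (0:Int) < 2),
      PySem.Int.mod_eq_emod_of_pos (by norm_num : (0:Int) < 2)] at hp
  rcases Int.emod_two_eq a with he | ho
  · obtain ⟨a', rfl⟩ := Int.dvd_of_emod_eq_zero he
    have hq2 : q % 2 = 0 := by omega
    obtain ⟨q', rfl⟩ := Int.dvd_of_emod_eq_zero hq2
    have h0 : n % 4 = 0 := by
      have h1 : n = 4 * (a' * q') := by rw [hq]; ring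
      rw [h1]; exact Int.mul_emod_right 4 _
    omega
  · have hq2 : q % 2 = 1 := by omega
    have h0 : n % 2 = 1 := by rw [hq, Int.mul_emod, ho, hq2]; decide
    omega

-- ===== VERDICT (by name: the statement is the Claim_ definition above) =====
theorem moreTimesLess_spec : Claim_equal_moreTimesLess := by
  intro n _ hpre
  unfold Spec_moreTimesLess
  unfold Pre_moreTimesLess at hpre
  simp only [moreTimesLess, moreTimesLess_alt]
  by_cases h1 : n = 1
  · simp [h1]
  rw [if_neg h1, if_neg h1]
  rw [PySem.List.foldl_ite_add_one]
  by_cases h2 : PySem.Int.mod n 4 = 2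
  · rw [if_pos h2]
    have hz : (PySem.List.pyRange 1 ((Nat.sqrt n.toNat : Int) + 1) 1).countP
        (fun a => decide (PySem.Int.mod n a = 0 ∧
          PySem.Int.mod a 2 = PySem.Int.mod (PySem.Int.floordiv n a) 2)) = 0 := by
      apply List.countP_eq_zero.mpr
      intro a hmem
      rw [PySem.List.mem_pyRange_one] at hmem
      simpa using pred_false_of_mod4 n a h2 (by omega)
    rw [hz]; simp
  rw [if_neg h2]
  by_cases hodd : PySem.Int.mod n 2 ≠ 0
  · rw [if_pos hodd, sum_map_ite_one_zero']
    rw [Int.zero_add]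
    norm_cast
    apply List.countP_congr
    intro a hmem
    rw [PySem.List.mem_pyRange_one] at hmem
    simp only [decide_eq_true_eq]
    exact odd_case_pred n a hodd (by omega)
  · rw [if_neg hodd]
    have hodd2 : PySem.Int.mod n 2 = 0 := not_not.mp hodd
    have h4 : PySem.Int.mod n 4 = 0 := by
      rw [PySem.Int.mod_eq_emod_of_pos (by norm_num : (0:Int) < 4)] at h2 ⊢
      rw [PySem.Int.mod_eq_emod_of_pos (by norm_num : (0:Int) < 2)] at hodd2
      omega
    rw [PySem.Int.mod_eq_zero_iff_dvd] at h4
    obtain ⟨m, hm⟩ := h4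
    have hdiv4 : PySem.Int.floordiv n 4 = m := by
      rw [PySem.Int.floordiv_eq_ediv_of_pos (by norm_num : (0:Int) < 4), hm,
        Int.mul_ediv_cancel_left m (by norm_num)]
    rw [hdiv4, sum_map_ite_one_zero', Int.zero_add]
    generalize Nat.sqrt n.toNat = K
    rw [show PySem.Int.floordiv ((K : Nat) : Int) 2 = ((K / 2 : Nat) : Int) from
      by exact_mod_cast PySem.Int.floordiv_natCast K 2]
    rw [hm]
    exact_mod_cast count4 m K
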